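-- pv_equiv track=rewrite | github.com/p1skiii/sql-agent | src/sql_agent_demo/core/sql_agent.py | _schema_has_column
-- ===== SOURCE A (Python) =====
-- def _schema_has_column(full_schema: str, column: str) -> bool:
--     col_l = column.lower()
--     for line in full_schema.splitlines():
--         parts = line.split(":")
--         if len(parts) < 2:
--             continue
--         cols_part = parts[1]
--         cols = [c.strip().lower() for c in cols_part.split(",") if c.strip()]
--         if col_l in cols:
--             return True
--     return False
-- ===== SOURCE B (Python) =====
-- def _schema_has_column(full_schema: str, column: str) -> bool:
--     # single character-level scan: a small state machine tracking which colon-field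
--     # of the current line we are in and the characters of the current candidate name
--     target = column.lower()
--     field = 0      # index of the colon-separated field we are currently inside
--     buf = []       # characters of the current comma-piece (collected only in field 1)
--
--     def hit():
--         name = ''.join(buf).strip()
--         return bool(name) and name.lower() == target
--
--     for ch in full_schema:
--         if ch == '\n' or ch == '\r':
--             if field == 1 and hit():
--                 return True
--             field = 0
--             buf = []
--         elif ch == ':':
--             if field == 1 and hit():
--                 return True
--             field += 1
--             buf = []
--         elif ch == ',':
--             if field == 1:
--                 if hit():
--                     return True
--                 buf = []
--         elif field == 1:
--             buf.append(ch)
--     return field == 1 and hit()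
-- ===== Notes on version B (the rewrite author's own statement) =====
-- stated objective: alternative
-- what changed: B replaces A's splitlines/split(':')/split(',')/strip-list pipeline with a single character-level scan of the schema string: a small state machine tracks which colon-field of the current line it is in and accumulates the current comma-piece, testing each completed piece against the lowercased target with an early return.
import Mathlib
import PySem

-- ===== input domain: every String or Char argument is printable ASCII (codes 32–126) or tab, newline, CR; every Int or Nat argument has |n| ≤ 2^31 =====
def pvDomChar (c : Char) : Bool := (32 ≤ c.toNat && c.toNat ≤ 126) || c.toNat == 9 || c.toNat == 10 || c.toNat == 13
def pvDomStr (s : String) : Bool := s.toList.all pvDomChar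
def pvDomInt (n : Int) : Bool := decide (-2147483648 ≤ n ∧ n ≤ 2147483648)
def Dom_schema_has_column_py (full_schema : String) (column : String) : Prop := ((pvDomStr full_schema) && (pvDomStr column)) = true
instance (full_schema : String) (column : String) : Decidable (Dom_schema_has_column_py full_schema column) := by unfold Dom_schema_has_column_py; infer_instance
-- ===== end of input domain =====

-- B replaces A's splitlines/split/strip pipeline with a single character-level scan
-- (a small state machine over the schema string); objective: alternative algorithm, same cost.

-- ===== PORT A =====
-- the loop 'for line in …: … return True' with its early return, as structural recursion
def pvLoopA (col_l : String) : List String → Bool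
  | [] => false
  | line :: rest =>
    let parts := (PySem.Str.split? line ":").getD []
    if parts.length < 2 then pvLoopA col_l rest
    else
      let cols_part := (PySem.List.pyGet? parts 1).getD ""
      let cols := (((PySem.Str.split? cols_part ",").getD []).filter
          (fun c => PySem.Str.strip c ≠ "")).map (fun c => PySem.Str.lower (PySem.Str.strip c))
      if cols.contains col_l then true else pvLoopA col_l rest

def schema_has_column_py (full_schema : String) (column : String) : Bool :=
  pvLoopA (PySem.Str.lower column) (PySem.Str.splitlines full_schema)

-- ===== PORT B =====
-- hit(): the current buffer, stripped, is a non-empty name equal (lowercased) to the target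
def pvHit (buf : List Char) (t : List Char) : Bool :=
  let name := PySem.Chars.strip buf.reverse
  !name.isEmpty && (PySem.Chars.lower name == t)

-- the 'for ch in full_schema' state machine: field = current colon-field index, buf = current piece (reversed)
def pvScan (t : List Char) : List Char → Nat → List Char → Bool
  | [], field, buf => field == 1 && pvHit buf t
  | c :: rest, field, buf =>
    if c = '\n' ∨ c = '\x0d' then
      ((field == 1 && pvHit buf t) || pvScan t rest 0 [])
    else if c = ':' then
      ((field == 1 && pvHit buf t) || pvScan t rest (field + 1) [])
    else if c = ',' then
      (if field == 1 then (pvHit buf t || pvScan t rest 1 []) else pvScan t rest field buf)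
    else
      pvScan t rest field (if field == 1 then c :: buf else buf)

def schema_has_column_py_alt (full_schema : String) (column : String) : Bool :=
  pvScan (PySem.Chars.lower column.toList) full_schema.toList 0 []

-- ===== PRECONDITION & SPEC =====
def Spec_schema_has_column_py (full_schema : String) (column : String) (out : Bool) : Prop := out = schema_has_column_py_alt full_schema column
instance (full_schema : String) (column : String) (out : Bool) : Decidable (Spec_schema_has_column_py full_schema column out) := by unfold Spec_schema_has_column_py; infer_instance

-- ===== CLAIM (what is proved, stated in full; the proofs are below) =====
def Claim_equal_schema_has_column_py : Prop := ∀ (full_schema : String) (column : String), Dom_schema_has_column_py full_schema column → Spec_schema_has_column_py full_schema column (schema_has_column_py full_schema column)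

-- ===== LEMMAS AND PROOFS =====

-- ---- A side: the loop is an 'any' over lines ----

-- the normalized column names contributed by one line (A's 'cols' when the guard passes)
def pvCols (line : String) : List String :=
  let parts := (PySem.Str.split? line ":").getD []
  if parts.length < 2 then []
  else
    (((PySem.Str.split? ((PySem.List.pyGet? parts 1).getD "") ",").getD []).filter
        (fun c => PySem.Str.strip c ≠ "")).map (fun c => PySem.Str.lower (PySem.Str.strip c))

theorem pvLoopA_eq_any (col_l : String) (ls : List String) :
    pvLoopA col_l ls = ls.any (fun line => (pvCols line).contains col_l) := by
  induction ls with
  | nil => rfl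
  | cons line rest ih =>
    by_cases h : ((PySem.Str.split? line ":").getD []).length < 2
    · have h1 : pvLoopA col_l (line :: rest) = pvLoopA col_l rest := by
        simp only [pvLoopA]; rw [if_pos h]
      have h2 : pvCols line = [] := by simp only [pvCols]; rw [if_pos h]
      simp [h1, h2, ih]
    · have h2 : pvCols line =
          (((PySem.Str.split? ((PySem.List.pyGet? ((PySem.Str.split? line ":").getD []) 1).getD "")
              ",").getD []).filter (fun c => PySem.Str.strip c ≠ "")).map
            (fun c => PySem.Str.lower (PySem.Str.strip c)) := by
        simp only [pvCols]; rw [if_neg h]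
      have h1 : pvLoopA col_l (line :: rest) =
          if (pvCols line).contains col_l then true else pvLoopA col_l rest := by
        simp only [pvLoopA]; rw [if_neg h, h2]
      rw [h1, List.any_cons, ← ih]
      cases hc : (pvCols line).contains col_l <;> simp [hc]

-- ---- characterizing the PySem splitters ----

-- single-character split, structurally
def pvConsHead (x : List Char) : List (List Char) → List (List Char)
  | [] => [x]
  | l :: ls => (x ++ l) :: ls

def pvSplit1 (sep : Char) : List Char → List (List Char)
  | [] => [[]]
  | c :: rest => if c = sep then [] :: pvSplit1 sep rest else pvConsHead [c] (pvSplit1 sep rest)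

theorem pvSplit1_ne_nil (sep : Char) (l : List Char) : pvSplit1 sep l ≠ [] := by
  cases l with
  | nil => simp [pvSplit1]
  | cons c rest =>
    simp only [pvSplit1]
    split
    · simp
    · cases h : pvSplit1 sep rest <;> simp [pvConsHead]

theorem goS_nil (sep : List Char) (n : Nat) (cur : List Char) (acc : List (List Char)) :
    PySem.Chars.splitOn.go sep (n+1) [] cur acc = (cur.reverse :: acc).reverse := by
  conv_lhs => rw [PySem.Chars.splitOn.go.eq_def]

theorem goS_cons (s : Char) (n : Nat) (c : Char) (rest cur : List Char) (acc : List (List Char)) :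
    PySem.Chars.splitOn.go [s] (n+1) (c :: rest) cur acc =
      if c = s then PySem.Chars.splitOn.go [s] n rest [] (cur.reverse :: acc)
      else PySem.Chars.splitOn.go [s] n rest (c :: cur) acc := by
  conv_lhs => rw [PySem.Chars.splitOn.go.eq_def]
  show (if [s].isPrefixOf (c :: rest) = true then
      PySem.Chars.splitOn.go [s] n (List.drop [s].length (c :: rest)) [] (cur.reverse :: acc)
    else PySem.Chars.splitOn.go [s] n rest (c :: cur) acc) = _
  by_cases h : c = s
  · subst h; simp [List.isPrefixOf]
  · simp only [List.isPrefixOf, Bool.and_true, beq_iff_eq, if_neg h]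
    rw [if_neg (by simpa [eq_comm] using h)]

theorem pvConsHead_nil (ls : List (List Char)) (h : ls ≠ []) : pvConsHead [] ls = ls := by
  cases ls with
  | nil => exact absurd rfl h
  | cons l ls => simp [pvConsHead]

theorem goS_eq (s : Char) (n : Nat) :
    ∀ (l cur : List Char) (acc : List (List Char)), l.length < n →
      PySem.Chars.splitOn.go [s] n l cur acc = acc.reverse ++ pvConsHead cur.reverse (pvSplit1 s l) := by
  induction n with
  | zero => intro l cur acc h; omega
  | succ m ih =>
    intro l cur acc h
    cases l with
    | nil => simp [goS_nil, pvSplit1, pvConsHead]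
    | cons c rest =>
      rw [goS_cons]
      by_cases hc : c = s
      · rw [if_pos hc, ih rest [] _ (by simpa using h)]
        simp only [List.reverse_nil, List.reverse_cons]
        rw [pvConsHead_nil _ (pvSplit1_ne_nil s rest)]
        rw [show pvSplit1 s (c :: rest) = [] :: pvSplit1 s rest by rw [pvSplit1, if_pos hc]]
        simp [pvConsHead]
      · rw [if_neg hc, ih rest (c :: cur) acc (by simpa using h)]
        have : pvSplit1 s (c :: rest) = pvConsHead [c] (pvSplit1 s rest) := by
          simp [pvSplit1, hc]
        rw [this]
        cases hs : pvSplit1 s rest with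
        | nil => exact absurd hs (pvSplit1_ne_nil s rest)
        | cons p ps => simp [pvConsHead]

theorem splitOn_eq (s : Char) (l : List Char) :
    PySem.Chars.splitOn l [s] = pvSplit1 s l := by
  show PySem.Chars.splitOn.go [s] (l.length + 1) l [] [] = _
  rw [goS_eq s (l.length + 1) l [] [] (by omega)]
  simp [pvConsHead_nil _ (pvSplit1_ne_nil s l)]

-- splitlines, structurally
def pvB (c : Char) : Bool :=
  decide (c.toNat = 10) || decide (c.toNat = 13) || decide (c.toNat = 11) || decide (c.toNat = 12) ||
    decide (c.toNat = 28) || decide (c.toNat = 29) || decide (c.toNat = 30) || decide (c.toNat = 133) ||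
    decide (c.toNat = 8232) || decide (c.toNat = 8233)

def pvLines : List Char → List (List Char)
  | [] => []
  | c :: rest =>
    if c = '\x0d' ∧ rest.head? = some '\n' then [] :: pvLines rest.tail
    else if pvB c then [] :: pvLines rest
    else pvConsHead [c] (pvLines rest)
termination_by l => l.length
decreasing_by all_goals simp [List.length_tail]; try omega

def pvPre (p : List Char) : List (List Char) → List (List Char)
  | [] => if p.isEmpty then [] else [p]
  | l :: ls => (p ++ l) :: ls

theorem pvPre_nil (ls : List (List Char)) : pvPre [] ls = ls := by
  cases ls <;> simp [pvPre]

theorem pvPre_consHead (p : List Char) (c : Char) (ls : List (List Char)) :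
    pvPre (p ++ [c]) ls = pvPre p (pvConsHead [c] ls) := by
  cases ls <;> simp [pvPre, pvConsHead]

theorem goL_cons (isB : Char → Bool) (c : Char) (rest cur : List Char) (acc : List (List Char))
    (h1 : ¬(c = '\x0d' ∧ rest.head? = some '\n')) :
    PySem.Chars.splitlines.go isB (c :: rest) cur acc =
      if isB c then PySem.Chars.splitlines.go isB rest [] (cur.reverse :: acc)
      else PySem.Chars.splitlines.go isB rest (c :: cur) acc := by
  conv_lhs => rw [PySem.Chars.splitlines.go.eq_def]
  split
  · simp_all
  · rename_i heq
    injection heq with hc hr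
    subst hc
    exact absurd ⟨rfl, by rw [hr]; rfl⟩ h1
  · rename_i h' c' rest' heq
    injection heq with hc hr
    subst hc; subst hr; rfl

theorem goL_rn (isB : Char → Bool) (rest cur : List Char) (acc : List (List Char)) :
    PySem.Chars.splitlines.go isB ('\x0d' :: '\n' :: rest) cur acc =
      PySem.Chars.splitlines.go isB rest [] (cur.reverse :: acc) := by
  conv_lhs => rw [PySem.Chars.splitlines.go.eq_def]
  rfl

theorem goL_nil (isB : Char → Bool) (cur : List Char) (acc : List (List Char)) :
    PySem.Chars.splitlines.go isB [] cur acc =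
      if cur.isEmpty then acc.reverse else (cur.reverse :: acc).reverse := by
  conv_lhs => rw [PySem.Chars.splitlines.go.eq_def]

theorem goL_eq (l : List Char) : ∀ (cur : List Char) (acc : List (List Char)),
    PySem.Chars.splitlines.go pvB l cur acc = acc.reverse ++ pvPre cur.reverse (pvLines l) := by
  induction l using pvLines.induct with
  | case1 =>
    intro cur acc
    rw [goL_nil]
    by_cases h : cur.isEmpty <;> simp [pvPre, h, pvLines]
  | case2 c rest h ih =>
    intro cur acc
    obtain ⟨hc, hh⟩ := h
    subst hc
    cases rest with
    | nil => simp at hh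
    | cons c2 tl =>
      simp only [List.head?_cons, Option.some.injEq] at hh
      subst hh
      simp only [List.tail_cons] at ih
      rw [goL_rn, ih]
      have h2 : pvLines ('\x0d' :: '\n' :: tl) = [] :: pvLines tl := by
        rw [pvLines]; simp
      rw [h2]
      simp only [List.reverse_nil, List.reverse_cons]
      rw [pvPre_nil]
      simp [pvPre]
  | case3 c rest h hB ih =>
    intro cur acc
    rw [goL_cons pvB c rest cur acc h, if_pos hB, ih]
    have : pvLines (c :: rest) = [] :: pvLines rest := by
      rw [pvLines]; rw [if_neg h, if_pos hB]
    rw [this]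
    simp only [List.reverse_nil, List.reverse_cons]
    rw [pvPre_nil]
    simp [pvPre]
  | case4 c rest h hB ih =>
    intro cur acc
    rw [goL_cons pvB c rest cur acc h, if_neg hB, ih]
    have : pvLines (c :: rest) = pvConsHead [c] (pvLines rest) := by
      rw [pvLines]; rw [if_neg h, if_neg hB]
    rw [this, ← pvPre_consHead]
    simp

theorem splitlines_eq (l : List Char) : PySem.Chars.splitlines l = pvLines l := by
  show PySem.Chars.splitlines.go pvB l [] [] = pvLines l
  rw [goL_eq]
  simp [pvPre_nil]

-- ---- B side: the scan is an 'any' of a per-line check over pvLines ----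

def pvLineEnd (t : List Char) : List Char → Nat → List Char → Bool
  | [], field, buf => field == 1 && pvHit buf t
  | c :: rest, field, buf =>
    if c = ':' then ((field == 1 && pvHit buf t) || pvLineEnd t rest (field + 1) [])
    else if c = ',' then
      (if field == 1 then (pvHit buf t || pvLineEnd t rest 1 []) else pvLineEnd t rest field buf)
    else pvLineEnd t rest field (if field == 1 then c :: buf else buf)

def pvRun (t : List Char) (ls : List (List Char)) (field : Nat) (buf : List Char) : Bool :=
  match ls with
  | [] => field == 1 && pvHit buf t
  | l :: ls => pvLineEnd t l field buf || ls.any (fun l => pvLineEnd t l 0 [])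

theorem pvHit_nil (t : List Char) : pvHit [] t = false := by
  simp [pvHit, PySem.Chars.strip, PySem.Chars.lstrip, PySem.Chars.rstrip]

theorem pvRun_zero (t : List Char) (ls : List (List Char)) :
    pvRun t ls 0 [] = ls.any (fun l => pvLineEnd t l 0 []) := by
  cases ls with
  | nil => simp [pvRun, pvHit_nil]
  | cons l ls => simp [pvRun]

theorem pvLines_eq_nil_iff (cs : List Char) : pvLines cs = [] ↔ cs = [] := by
  cases cs with
  | nil => simp [pvLines]
  | cons c rest =>
    rw [pvLines]
    constructor
    · intro h
      split at h
      · simp at h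
      · split at h
        · simp at h
        · cases hs : pvLines rest with
          | nil => rw [hs] at h; simp [pvConsHead] at h
          | cons p ps => rw [hs] at h; simp [pvConsHead] at h
    · intro h; simp at h

theorem scan_eq (t : List Char) (cs : List Char)
    (hD : ∀ c ∈ cs, pvB c = true → c = '\n' ∨ c = '\x0d') :
    ∀ (field : Nat) (buf : List Char), pvScan t cs field buf = pvRun t (pvLines cs) field buf := by
  induction cs using pvLines.induct with
  | case1 => intro field buf; simp [pvScan, pvLines, pvRun]
  | case2 c rest h ih =>
    intro field buf
    obtain ⟨hc, hh⟩ := h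
    subst hc
    cases rest with
    | nil => simp at hh
    | cons c2 tl =>
      simp only [List.head?_cons, Option.some.injEq] at hh
      subst hh
      simp only [List.tail_cons] at ih
      have hD' : ∀ c ∈ tl, pvB c = true → c = '\n' ∨ c = '\x0d' := by
        intro c hc; exact hD c (by simp [hc])
      rw [pvScan, if_pos (by right; rfl)]
      rw [pvScan, if_pos (by left; rfl)]
      rw [ih hD' 0 []]
      have hl : pvLines ('\x0d' :: '\n' :: tl) = [] :: pvLines tl := by
        rw [pvLines]; simp
      rw [hl]
      show ((field == 1 && pvHit buf t) || ((0 == 1 && pvHit [] t) || pvRun t (pvLines tl) 0 [])) = _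
      rw [pvRun_zero]
      show ((field == 1 && pvHit buf t) || (false || _)) = _
      rw [Bool.false_or]
      show _ = pvRun t ([] :: pvLines tl) field buf
      rw [pvRun]
      show _ = (pvLineEnd t [] field buf || _)
      rw [pvLineEnd]
  | case3 c rest h hB ih =>
    intro field buf
    have hc : c = '\n' ∨ c = '\x0d' := hD c (by simp) hB
    have hD' : ∀ x ∈ rest, pvB x = true → x = '\n' ∨ x = '\x0d' := by
      intro x hx; exact hD x (by simp [hx])
    rw [pvScan, if_pos hc, ih hD']
    have hl : pvLines (c :: rest) = [] :: pvLines rest := by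
      rw [pvLines]; rw [if_neg h, if_pos hB]
    rw [hl, pvRun]
    show ((field == 1 && pvHit buf t) || pvRun t (pvLines rest) 0 []) =
      (pvLineEnd t [] field buf || _)
    rw [pvRun_zero, pvLineEnd]
  | case4 c rest h hB ih =>
    intro field buf
    have hD' : ∀ x ∈ rest, pvB x = true → x = '\n' ∨ x = '\x0d' := by
      intro x hx; exact hD x (by simp [hx])
    have hnb : ¬(c = '\n' ∨ c = '\x0d') := by
      rintro (rfl | rfl) <;> simp [pvB] at hB
    have hl : pvLines (c :: rest) = pvConsHead [c] (pvLines rest) := by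
      rw [pvLines]; rw [if_neg h, if_neg hB]
    rw [pvScan, if_neg hnb, hl]
    simp only [ih hD']
    cases hs : pvLines rest with
    | nil =>
      have hr : rest = [] := (pvLines_eq_nil_iff rest).mp hs
      subst hr
      by_cases hcol : c = ':'
      · simp [hcol, pvConsHead, pvRun, pvLineEnd, pvHit_nil]
      · by_cases hcom : c = ','
        · cases hf : (field == 1) <;>
            simp [hcol, hcom, hf, pvConsHead, pvRun, pvLineEnd, pvHit_nil]
        · cases hf : (field == 1) <;>
            simp [hcol, hcom, hf, pvConsHead, pvRun, pvLineEnd, pvHit_nil]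
    | cons l ls =>
      simp only [pvConsHead, pvRun, List.singleton_append]
      rw [pvLineEnd]
      by_cases hcol : c = ':'
      · simp [hcol, Bool.or_assoc]
      · by_cases hcom : c = ','
        · cases hf : (field == 1) <;> simp [hcol, hcom, hf, Bool.or_assoc]
        · cases hf : (field == 1) <;> simp [hcol, hcom, hf]

-- ---- per-line: the state machine computes A's per-line membership ----

def pvHitP (t p : List Char) : Bool :=
  !(PySem.Chars.strip p).isEmpty && (PySem.Chars.lower (PySem.Chars.strip p) == t)

def pvLineAns (t l : List Char) : Bool :=
  let parts := pvSplit1 ':' l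
  if parts.length < 2 then false
  else (pvSplit1 ',' (parts.getD 1 [])).any (pvHitP t)

theorem pvLineEnd_ge2 (t : List Char) (l : List Char) :
    ∀ (field : Nat) (buf : List Char), 2 ≤ field → pvLineEnd t l field buf = false := by
  induction l with
  | nil => intro field buf h; rw [pvLineEnd]; simp; omega
  | cons c rest ih =>
    intro field buf h
    rw [pvLineEnd]
    by_cases hcol : c = ':'
    · rw [if_pos hcol]
      have h1 : (field == 1) = false := by simp; omega
      rw [h1, ih (field + 1) [] (by omega)]
      simp
    · rw [if_neg hcol]
      by_cases hcom : c = ','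
      · rw [if_pos hcom]
        have h1 : (field == 1) = false := by simp; omega
        rw [h1]
        simp only [if_false, Bool.false_eq_true]
        exact ih field buf h
      · rw [if_neg hcom]
        have h1 : (field == 1) = false := by simp; omega
        rw [h1]
        simp only [if_false, Bool.false_eq_true]
        exact ih field buf h

theorem split1_no_sep (sep : Char) (l : List Char) (h : sep ∉ l) : pvSplit1 sep l = [l] := by
  induction l with
  | nil => simp [pvSplit1]
  | cons c rest ih =>
    simp only [List.mem_cons, not_or] at h
    rw [pvSplit1, if_neg (fun hc => h.1 hc.symm), ih h.2]
    simp [pvConsHead]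

theorem split1_append (sep : Char) (xs ys : List Char) (h : sep ∉ xs) :
    pvSplit1 sep (xs ++ ys) = pvConsHead xs (pvSplit1 sep ys) := by
  induction xs with
  | nil => simp [pvConsHead_nil _ (pvSplit1_ne_nil sep ys)]
  | cons c rest ih =>
    simp only [List.mem_cons, not_or] at h
    rw [List.cons_append, pvSplit1, if_neg (fun hc => h.1 hc.symm), ih h.2]
    cases hs : pvSplit1 sep ys with
    | nil => exact absurd hs (pvSplit1_ne_nil sep ys)
    | cons p ps =>
      cases hr : pvSplit1 sep (rest ++ ys) with
      | nil => exact absurd hr (pvSplit1_ne_nil sep (rest ++ ys))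
      | cons q qs => simp [pvConsHead]

theorem pvHit_eq (buf t : List Char) : pvHit buf t = pvHitP t buf.reverse := by
  simp [pvHit, pvHitP]

theorem pvLineEnd_one (t : List Char) (l : List Char) :
    ∀ (buf : List Char), ',' ∉ buf →
      pvLineEnd t l 1 buf =
        (pvSplit1 ',' (buf.reverse ++ l.takeWhile (· ≠ ':'))).any (pvHitP t) := by
  induction l with
  | nil =>
    intro buf h
    rw [pvLineEnd]
    have hb : ',' ∉ buf.reverse := by simpa using h
    simp [split1_no_sep ',' buf.reverse hb, pvHit_eq]
  | cons c rest ih =>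
    intro buf h
    have hb : ',' ∉ buf.reverse := by simpa using h
    rw [pvLineEnd]
    by_cases hcol : c = ':'
    · rw [if_pos hcol]
      rw [pvLineEnd_ge2 t rest 2 [] (by omega)]
      subst hcol
      simp [List.takeWhile, split1_no_sep ',' buf.reverse hb, pvHit_eq]
    · rw [if_neg hcol]
      by_cases hcom : c = ','
      · rw [if_pos hcom]
        simp only [beq_self_eq_true, if_true]
        rw [ih [] (by simp)]
        subst hcom
        have ht : (','::rest).takeWhile (· ≠ ':') = ',' :: rest.takeWhile (· ≠ ':') := by
          simp [List.takeWhile]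
        rw [ht, split1_append ',' buf.reverse (',' :: rest.takeWhile (· ≠ ':')) hb]
        rw [pvSplit1, if_pos rfl]
        simp [pvConsHead, pvHit_eq]
      · rw [if_neg hcom]
        simp only [beq_self_eq_true, if_true]
        rw [ih (c :: buf) (by simp [h]; exact fun hc => hcom hc.symm)]
        have ht : (c::rest).takeWhile (· ≠ ':') = c :: rest.takeWhile (· ≠ ':') := by
          simp [List.takeWhile, hcol]
        rw [ht]
        simp

theorem split1_getD_zero (sep : Char) (l : List Char) :
    (pvSplit1 sep l).getD 0 [] = l.takeWhile (· ≠ sep) := by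
  induction l with
  | nil => simp [pvSplit1]
  | cons c rest ih =>
    rw [pvSplit1]
    by_cases hc : c = sep
    · rw [if_pos hc]; subst hc; simp [List.takeWhile]
    · rw [if_neg hc]
      have ht : (c::rest).takeWhile (· ≠ sep) = c :: rest.takeWhile (· ≠ sep) := by
        simp [List.takeWhile, hc]
      rw [ht, ← ih]
      cases hs : pvSplit1 sep rest with
      | nil => exact absurd hs (pvSplit1_ne_nil sep rest)
      | cons p ps => simp [pvConsHead]

theorem pvLineAns_skip (t : List Char) (c : Char) (rest : List Char) (h : c ≠ ':') :
    pvLineAns t (c :: rest) = pvLineAns t rest := by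
  unfold pvLineAns
  have hp : pvSplit1 ':' (c :: rest) = pvConsHead [c] (pvSplit1 ':' rest) := by
    rw [pvSplit1, if_neg h]
  rw [hp]
  cases hs : pvSplit1 ':' rest with
  | nil => exact absurd hs (pvSplit1_ne_nil ':' rest)
  | cons p ps => simp [pvConsHead]

theorem lineEnd_eq (t : List Char) (l : List Char) :
    pvLineEnd t l 0 [] = pvLineAns t l := by
  induction l with
  | nil => simp [pvLineEnd, pvLineAns, pvSplit1, pvHit_nil]
  | cons c rest ih =>
    rw [pvLineEnd]
    by_cases hcol : c = ':'
    · rw [if_pos hcol]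
      rw [pvLineEnd_one t rest [] (by simp)]
      subst hcol
      unfold pvLineAns
      rw [pvSplit1, if_pos rfl]
      have hlen : ¬(([] :: pvSplit1 ':' rest).length < 2) := by
        cases hs : pvSplit1 ':' rest with
        | nil => exact absurd hs (pvSplit1_ne_nil ':' rest)
        | cons p ps => simp
      rw [if_neg hlen]
      have : (([] : List Char) :: pvSplit1 ':' rest).getD 1 [] = (pvSplit1 ':' rest).getD 0 [] := by
        simp
      rw [this, split1_getD_zero]
      simp [pvHit_nil]
    · rw [if_neg hcol]
      by_cases hcom : c = ','
      · rw [if_pos hcom]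
        rw [pvLineAns_skip t c rest hcol, ← ih]
        simp
      · rw [if_neg hcom]
        rw [pvLineAns_skip t c rest hcol, ← ih]
        simp

-- ---- bridging A's per-line String computation to char level ----

theorem contains_filter_map {α β : Type} [BEq β] [LawfulBEq β]
    (xs : List α) (q : α → Bool) (g : α → β) (t : β) :
    ((xs.filter q).map g).contains t = xs.any (fun x => q x && (g x == t)) := by
  induction xs with
  | nil => rfl
  | cons x xs ih =>
    simp only [List.filter_cons]
    by_cases h : q x
    · rw [if_pos h, List.map_cons, List.contains_cons, ih, List.any_cons, h, Bool.true_and,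
        Bool.beq_comm]
    · rw [if_neg h, ih, List.any_cons, Bool.eq_false_iff.mpr h, Bool.false_and, Bool.false_or]

theorem cols_bridge (col : String) (l : List Char) :
    (pvCols (String.ofList l)).contains (PySem.Str.lower col) =
      pvLineAns (PySem.Chars.lower col.toList) l := by
  have hsplit : (PySem.Str.split? (String.ofList l) ":").getD [] =
      (pvSplit1 ':' l).map String.ofList := by
    simp [PySem.Str.split?, PySem.Chars.split?]
    rw [splitOn_eq]
  unfold pvCols pvLineAns
  rw [hsplit]
  simp only [List.length_map]
  by_cases hlen : (pvSplit1 ':' l).length < 2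
  · rw [if_pos hlen, if_pos hlen]; simp
  · rw [if_neg hlen, if_neg hlen]
    obtain ⟨p0, p1, ps, hps⟩ : ∃ p0 p1 ps, pvSplit1 ':' l = p0 :: p1 :: ps := by
      match hs : pvSplit1 ':' l with
      | [] => exact absurd hs (pvSplit1_ne_nil ':' l)
      | [p] => rw [hs] at hlen; simp at hlen
      | p0 :: p1 :: ps => exact ⟨p0, p1, ps, rfl⟩
    rw [hps]
    have hget : (PySem.List.pyGet? ((p0 :: p1 :: ps).map String.ofList) 1).getD "" =
        String.ofList p1 := by
      simp [PySem.List.pyGet?, PySem.List.pyIdx?]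
    rw [hget]
    have hsplit2 : (PySem.Str.split? (String.ofList p1) ",").getD [] =
        (pvSplit1 ',' p1).map String.ofList := by
      simp [PySem.Str.split?, PySem.Chars.split?]
      rw [splitOn_eq]
    rw [hsplit2]
    rw [show (p0 :: p1 :: ps).getD 1 [] = p1 from rfl]
    have hstrip : ∀ p : List Char, PySem.Str.strip (String.ofList p) =
        String.ofList (PySem.Chars.strip p) := by
      intro p; apply String.toList_inj.mp; simp
    have hlower : ∀ p : List Char, PySem.Str.lower (String.ofList p) =
        String.ofList (PySem.Chars.lower p) := by
      intro p; apply String.toList_inj.mp; simp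
    have hlowercol : PySem.Str.lower col = String.ofList (PySem.Chars.lower col.toList) := by
      apply String.toList_inj.mp; simp
    rw [List.filter_map, List.map_map, hlowercol, contains_filter_map]
    apply List.any_congr rfl
    intro p
    simp only [Function.comp_apply, hstrip, hlower, pvHitP]
    congr 1
    · cases PySem.Chars.strip p <;> simp
    · rw [Bool.eq_iff_iff]; simp [String.ofList_inj]

-- ===== VERDICT (by name: the statement is the Claim_ definition above) =====
theorem schema_has_column_py_spec : Claim_equal_schema_has_column_py := by
  intro full_schema column hDom
  unfold Spec_schema_has_column_py schema_has_column_py schema_has_column_py_alt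
  rw [pvLoopA_eq_any]
  have hA : PySem.Str.splitlines full_schema = (pvLines full_schema.toList).map String.ofList := by
    show (PySem.Chars.splitlines full_schema.toList).map String.ofList = _
    rw [splitlines_eq]
  rw [hA, List.any_map]
  have hDc : ∀ c ∈ full_schema.toList, pvB c = true → c = '\n' ∨ c = '\x0d' := by
    intro c hc hB
    have hdom : pvDomChar c = true := by
      unfold Dom_schema_has_column_py at hDom
      simp only [Bool.and_eq_true, pvDomStr, List.all_eq_true] at hDom
      exact hDom.1 c hc
    simp only [pvDomChar, Bool.or_eq_true, Bool.and_eq_true, decide_eq_true_eq,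
      beq_iff_eq] at hdom
    simp only [pvB, Bool.or_eq_true, decide_eq_true_eq] at hB
    have h10 : c.toNat = 10 ∨ c.toNat = 13 := by omega
    cases h10 with
    | inl h =>
      left
      exact Char.ext (UInt32.toNat_inj.mp (by rw [show c.val.toNat = 10 from h]; rfl))
    | inr h =>
      right
      exact Char.ext (UInt32.toNat_inj.mp (by rw [show c.val.toNat = 13 from h]; rfl))
  rw [scan_eq _ _ hDc 0 [], pvRun_zero]
  simp only [lineEnd_eq]
  apply List.any_congr rfl
  intro l
  simpa [Function.comp] using cols_bridge column l
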